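-- pv_equiv track=rewrite | github.com/alistairewj/bert-deid | bert_deid/tokenization.py | tokenize_punctuation
-- ===== SOURCE A (Python) =====
-- import unicodedata
--
-- def tokenize_punctuation(word, offset):
--     """
--     Split a string into a list of sub-tokens based on punctuation.
--     Retain offsets.
--     """
--
--     j = 0
--     punc_words = []
--     punc_offsets = []
--
--     punc_new_word = True
--     while j < len(word):
--         char = word[j]
--         if _is_punctuation(char):
--             punc_words.append([char])
--             punc_offsets.append([offset[j]])
--             punc_new_word = True
--         else:
--             if punc_new_word:
--                 # initialize empty lists
--                 punc_words.append([])
--                 punc_offsets.append([])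
--                 punc_new_word = False
--             punc_words[-1].append(char)
--             punc_offsets[-1].append(offset[j])
--         j += 1
--
--     # flatten strings within punc_words list
--     punc_words = ["".join(x) for x in punc_words]
--     return punc_words, punc_offsets
--
-- def _is_punctuation(char):
--     """Checks whether `chars` is a punctuation character."""
--     cp = ord(char)
--     # We treat all non-letter/number ASCII as punctuation.
--     # Characters such as "^", "$", and "`" are not in the Unicode
--     # Punctuation class but we treat them as punctuation anyways, for
--     # consistency.
--     if ((cp >= 33 and cp <= 47) or (cp >= 58 and cp <= 64) or
--             (cp >= 91 and cp <= 96) or (cp >= 123 and cp <= 126)):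
--         return True
--     cat = unicodedata.category(char)
--     if cat.startswith("P"):
--         return True
--     return False
-- ===== SOURCE B (Python) =====
-- import unicodedata
--
--
-- def tokenize_punctuation(word, offset):
--     """
--     Split a string into a list of sub-tokens based on punctuation.
--     Retain offsets.
--     """
--     n = len(word)
--     # explicit indexing so a too-short offset list raises IndexError as in A
--     offs = [offset[j] for j in range(n)]
--     # a token starts at i iff i == 0, or word[i] is punctuation, or word[i-1] is
--     bounds = [i for i in range(n)
--               if i == 0 or _is_punctuation(word[i]) or _is_punctuation(word[i - 1])]
--     ends = bounds[1:] + [n]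
--     punc_words = [word[b:e] for b, e in zip(bounds, ends)]
--     punc_offsets = [offs[b:e] for b, e in zip(bounds, ends)]
--     return punc_words, punc_offsets
--
--
-- def _is_punctuation(char):
--     """Checks whether `chars` is a punctuation character."""
--     cp = ord(char)
--     if ((cp >= 33 and cp <= 47) or (cp >= 58 and cp <= 64) or
--             (cp >= 91 and cp <= 96) or (cp >= 123 and cp <= 126)):
--         return True
--     cat = unicodedata.category(char)
--     if cat.startswith("P"):
--         return True
--     return False
-- ===== Notes on version B (the rewrite author's own statement) =====
-- stated objective: alternative
-- what changed: Replaces A's stateful while-loop (punc_new_word flag plus in-place append to the last list) by a staged computation: first the list of token-start indices (i==0, or word[i] or word[i-1] is punctuation), then slicing word and offsets between consecutive starts.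
import Mathlib
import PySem

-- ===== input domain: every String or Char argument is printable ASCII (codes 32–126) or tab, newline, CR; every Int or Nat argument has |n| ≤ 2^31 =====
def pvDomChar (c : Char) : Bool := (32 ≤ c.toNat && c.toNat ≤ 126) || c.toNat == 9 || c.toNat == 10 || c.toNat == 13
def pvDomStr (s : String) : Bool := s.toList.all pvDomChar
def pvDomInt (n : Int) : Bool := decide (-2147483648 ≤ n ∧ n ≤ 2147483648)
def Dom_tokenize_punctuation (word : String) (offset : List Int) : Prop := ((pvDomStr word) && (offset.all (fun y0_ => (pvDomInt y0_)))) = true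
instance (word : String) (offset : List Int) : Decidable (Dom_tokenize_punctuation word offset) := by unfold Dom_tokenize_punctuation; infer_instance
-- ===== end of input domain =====

-- B replaces A's stateful while-loop (new-word flag, append to last list) by a staged
-- computation: first the list of token-start indices, then slices of word/offset between
-- consecutive starts; same cost, a genuinely different decomposition.


-- _is_punctuation: exact on Dom's characters (ASCII 32–126, tab/newline/CR); for those the
-- Unicode "P*" category test adds nothing beyond the four ASCII code ranges.
def isPunct (c : Char) : Bool :=
  let cp := c.toNat
  (33 ≤ cp && cp ≤ 47) || (58 ≤ cp && cp ≤ 64) || (91 ≤ cp && cp ≤ 96) || (123 ≤ cp && cp ≤ 126)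

-- ===== PORT A =====
-- A's while-loop; accumulators are kept head-first (Python appends at the tail /
-- mutates the last element; here we cons / mutate the head and reverse at the end).
-- Second clause: word[j] exists but offset[j] raises IndexError in Python (excluded by Pre_).
def tpA_loop : List Char → List Int → List (List Char) → List (List Int) → Bool →
    List (List Char) × List (List Int)
  | [], _, pw, po, _ => (pw, po)
  | _ :: _, [], pw, po, _ => (pw, po)
  | c :: cs, o :: os, pw, po, nw =>
    if isPunct c then tpA_loop cs os ([c] :: pw) ([o] :: po) true
    else if nw then
      -- initialize empty lists, then append char/offset to them
      tpA_loop cs os (([] ++ [c]) :: pw) (([] ++ [o]) :: po) false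
    else
      match pw, po with
      | w :: pw', off :: po' => tpA_loop cs os ((w ++ [c]) :: pw') ((off ++ [o]) :: po') false
      | _, _ => (pw, po)  -- unreachable: punc_words is nonempty whenever punc_new_word is false

def tokenize_punctuation (word : String) (offset : List Int) : List String × List (List Int) :=
  let r := tpA_loop word.toList offset [] [] true
  (r.1.reverse.map (fun x => String.mk x), r.2.reverse)

-- ===== PORT B =====
-- bounds = [i for i in range(n) if i == 0 or _is_punctuation(word[i]) or _is_punctuation(word[i-1])]
-- word[i]/word[i-1] are in range whenever evaluated (the 'or' short-circuits at i == 0), so getD is exact.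
def tpB_bounds (cs : List Char) : List Nat :=
  (List.range cs.length).filter
    (fun i => i == 0 || isPunct (cs.getD i ' ') || isPunct (cs.getD (i - 1) ' '))

-- [l[b:e] for b, e in zip(bounds, ends)]; here 0 ≤ b ≤ e so Python's l[b:e] is (l.drop b).take (e-b) (exact).
def tpB_segs {α : Type} (l : List α) (bs : List Nat) (n : Nat) : List (List α) :=
  ((bs.zip (bs.drop 1 ++ [n])).map (fun be => (l.drop be.1).take (be.2 - be.1)))

def tokenize_punctuation_alt (word : String) (offset : List Int) : List String × List (List Int) :=
  let cs := word.toList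
  let n := cs.length
  -- offs = [offset[j] for j in range(n)]; pyGet? none = IndexError, excluded by Pre_
  let offs := (List.range n).map (fun j : Nat => (PySem.List.pyGet? offset (j : Int)).getD 0)
  let bs := tpB_bounds cs
  ((tpB_segs cs bs n).map (fun x => String.mk x), tpB_segs offs bs n)

-- ===== PRECONDITION & SPEC =====
-- Pre_ excludes exactly the inputs where A raises IndexError (offset shorter than word); B raises there too.
def Pre_tokenize_punctuation (word : String) (offset : List Int) : Prop :=
  word.toList.length ≤ offset.length
instance (word : String) (offset : List Int) : Decidable (Pre_tokenize_punctuation word offset) := by unfold Pre_tokenize_punctuation; infer_instance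

def pvWitness_tokenize_punctuation : String × List Int := ("ab, c!", [0, 1, 2, 3, 4, 5])

def Spec_tokenize_punctuation (word : String) (offset : List Int) (out : List String × List (List Int)) : Prop := out = tokenize_punctuation_alt word offset
instance (word : String) (offset : List Int) (out : List String × List (List Int)) : Decidable (Spec_tokenize_punctuation word offset out) := by unfold Spec_tokenize_punctuation; infer_instance

-- ===== CLAIM (what is proved, stated in full; the proofs are below) =====
def Claim_equal_tokenize_punctuation : Prop := ∀ (word : String) (offset : List Int), Dom_tokenize_punctuation word offset → Pre_tokenize_punctuation word offset → Spec_tokenize_punctuation word offset (tokenize_punctuation word offset)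

-- ===== LEMMAS AND PROOFS =====

-- Reference: split the zipped (char, offset) list one element at a time, cutting
-- between adjacent elements p, q whenever either is punctuation.
def splitT : List (Char × Int) → List (List (Char × Int))
  | [] => []
  | [p] => [[p]]
  | p :: q :: t =>
    if isPunct p.1 || isPunct q.1 then [p] :: splitT (q :: t)
    else
      match splitT (q :: t) with
      | g :: gs => (p :: g) :: gs
      | [] => [[p]]  -- unreachable

-- A-side run decomposition (what tpA_loop accumulates, head-first).
def outW : List (Char × Int) → List (List Char)
  | [] => []
  | p :: ps =>
    if isPunct p.1 then [p.1] :: outW ps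
    else (p.1 :: (ps.takeWhile (fun q => !isPunct q.1)).map Prod.fst) ::
      outW (ps.dropWhile (fun q => !isPunct q.1))
termination_by l => l.length
decreasing_by
  · simp
  · simp only [List.length_cons]
    exact Nat.lt_succ_of_le (List.length_dropWhile_le _ _)

def outO : List (Char × Int) → List (List Int)
  | [] => []
  | p :: ps =>
    if isPunct p.1 then [p.2] :: outO ps
    else (p.2 :: (ps.takeWhile (fun q => !isPunct q.1)).map Prod.snd) ::
      outO (ps.dropWhile (fun q => !isPunct q.1))
termination_by l => l.length
decreasing_by
  · simp
  · simp only [List.length_cons]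
    exact Nat.lt_succ_of_le (List.length_dropWhile_le _ _)

theorem loopA (n : Nat) : ∀ (cs : List Char) (os : List Int), cs.length ≤ os.length → cs.length ≤ n →
    (∀ pw po, tpA_loop cs os pw po true =
      ((outW (cs.zip os)).reverse ++ pw, (outO (cs.zip os)).reverse ++ po)) ∧
    (∀ w off pw po, tpA_loop cs os (w :: pw) (off :: po) false =
      ((outW ((cs.zip os).dropWhile (fun q => !isPunct q.1))).reverse ++
        (w ++ ((cs.zip os).takeWhile (fun q => !isPunct q.1)).map Prod.fst) :: pw,
       (outO ((cs.zip os).dropWhile (fun q => !isPunct q.1))).reverse ++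
        (off ++ ((cs.zip os).takeWhile (fun q => !isPunct q.1)).map Prod.snd) :: po)) := by
  induction n with
  | zero =>
    intro cs os _ hn
    have : cs = [] := List.eq_nil_of_length_eq_zero (Nat.le_zero.mp hn)
    subst this
    constructor <;> intros <;> simp [tpA_loop, outW, outO]
  | succ n ih =>
    intro cs os hlen hn
    match cs, os with
    | [], _ => constructor <;> intros <;> simp [tpA_loop, outW, outO]
    | c :: cs', [] => simp at hlen
    | c :: cs', o :: os' =>
      have hlen' : cs'.length ≤ os'.length := by simpa using hlen
      have hn' : cs'.length ≤ n := by simpa using hn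
      have IH := ih cs' os' hlen' hn'
      by_cases hp : isPunct c = true
      · constructor
        · intro pw po
          simp only [tpA_loop, hp, if_pos]
          rw [IH.1]
          simp [outW, outO, hp, List.append_assoc]
        · intro w off pw po
          simp only [tpA_loop, hp, if_pos]
          rw [IH.1]
          simp [outW, outO, hp, List.append_assoc]
      · constructor
        · intro pw po
          simp only [tpA_loop, hp, if_neg, if_pos, Bool.false_eq_true, ite_false, ite_true,
            List.nil_append]
          rw [IH.2]
          simp [outW, outO, hp]
        · intro w off pw po
          simp only [tpA_loop, hp, Bool.false_eq_true, ite_false]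
          rw [IH.2]
          simp only [List.zip_cons_cons, List.takeWhile_cons, List.dropWhile_cons, hp,
            Bool.not_false, ite_true, if_pos]
          simp [List.append_assoc]

-- outW/outO are the fst/snd projections of splitT.
theorem out_eq_splitT (n : Nat) : ∀ ps : List (Char × Int), ps.length ≤ n →
    outW ps = (splitT ps).map (List.map Prod.fst) ∧
    outO ps = (splitT ps).map (List.map Prod.snd) := by
  induction n with
  | zero =>
    intro ps hn
    have : ps = [] := List.eq_nil_of_length_eq_zero (Nat.le_zero.mp hn)
    subst this; simp [outW, outO, splitT]
  | succ n ih =>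
    intro ps hn
    match ps with
    | [] => simp [outW, outO, splitT]
    | [p] =>
      by_cases hp : isPunct p.1 = true <;> simp [outW, outO, splitT, hp]
    | p :: q :: t =>
      have hn' : (q :: t).length ≤ n := by simpa using hn
      have IH := ih (q :: t) hn'
      by_cases hp : isPunct p.1 = true
      · rw [outW, outO, splitT]
        simp only [hp, Bool.true_or, if_pos, ite_true, List.map_cons]
        exact ⟨by rw [IH.1]; simp, by rw [IH.2]; simp⟩
      · by_cases hq : isPunct q.1 = true
        · rw [outW, outO, splitT]
          simp only [hp, hq, Bool.false_or, Bool.true_or, ite_true, ite_false,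
            Bool.false_eq_true, List.takeWhile_cons, List.dropWhile_cons, Bool.not_true,
            List.map_nil, List.map_cons]
          exact ⟨by rw [IH.1], by rw [IH.2]⟩
        · -- join case: splitT merges p into the head group of splitT (q :: t)
          rw [outW, outO, splitT]
          simp only [hp, hq, Bool.or_self, Bool.false_eq_true, ite_false,
            List.takeWhile_cons, List.dropWhile_cons, Bool.not_false, ite_true]
          have h1 := IH.1
          have h2 := IH.2
          rw [outW] at h1
          rw [outO] at h2
          simp only [hq, Bool.false_eq_true, ite_false] at h1 h2
          match hsp : splitT (q :: t) with
          | [] => rw [hsp] at h1; simp at h1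
          | g :: gs =>
            rw [hsp] at h1 h2
            simp only [List.map_cons, List.cons.injEq] at h1 h2
            constructor
            · simp only [List.map_cons, h1.1.symm, h1.2.symm]
            · simp only [List.map_cons, h2.1.symm, h2.2.symm]

theorem splitT_ne_nil (p : Char × Int) (ps : List (Char × Int)) : splitT (p :: ps) ≠ [] := by
  match ps with
  | [] => simp [splitT]
  | q :: t =>
    rw [splitT]
    split
    · simp
    · split <;> simp

theorem bounds_head (b : Char) (t : List Char) :
    ∃ r, tpB_bounds (b :: t) = 0 :: r := by
  unfold tpB_bounds
  rw [List.length_cons, List.range_succ_eq_map, List.filter_cons]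
  simp

theorem bounds_cons (a b : Char) (t : List Char) :
    tpB_bounds (a :: b :: t) =
      0 :: (if isPunct a || isPunct b then tpB_bounds (b :: t)
            else (tpB_bounds (b :: t)).tail).map Nat.succ := by
  unfold tpB_bounds
  rw [show (a :: b :: t).length = (t.length + 1) + 1 from rfl,
     show (b :: t).length = t.length + 1 from rfl]
  rw [List.range_succ_eq_map, List.filter_cons, List.range_succ_eq_map, List.filter_cons]
  simp only [beq_self_eq_true, Bool.true_or, ite_true]
  congr 1
  simp only [List.filter_map, List.filter_cons]
  cases ha : isPunct a <;> cases hb : isPunct b <;>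
    simp [Function.comp, ha, hb] <;>
    exact congrArg _ (List.filter_congr (fun j _ => by simp))

theorem segs_shift {α : Type} (a : α) (l : List α) (bs : List Nat) (n : Nat) :
    tpB_segs (a :: l) (bs.map Nat.succ) (n + 1) = tpB_segs l bs n := by
  unfold tpB_segs
  rw [show ([n + 1] : List Nat) = [n].map Nat.succ from rfl,
     show (bs.map Nat.succ).drop 1 = (bs.drop 1).map Nat.succ from (List.map_drop ..).symm,
     ← List.map_append, List.zip_map, List.map_map]
  congr 1
  funext be
  simp [Function.comp, Nat.succ_sub_succ]

-- join: B's first slice absorbs a when the head bound stays alone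
theorem segs_join {α : Type} (a : α) (l : List α) (r : List Nat) :
    tpB_segs (a :: l) (0 :: r.map Nat.succ) (l.length + 1) =
      match tpB_segs l (0 :: r) l.length with
      | s0 :: srest => (a :: s0) :: srest
      | [] => [[a]] := by
  unfold tpB_segs
  match r with
  | [] => simp
  | r0 :: r' =>
    simp only [List.drop_one, List.tail_cons, List.map_cons, List.zip_cons_cons,
      List.cons_append]
    congr 1
    simpa [tpB_segs] using segs_shift a l (r0 :: r') l.length

theorem segs_cut {α : Type} (a : α) (l : List α) (r : List Nat) (n : Nat) :
    tpB_segs (a :: l) (0 :: (0 :: r).map Nat.succ) (n + 1) = [a] :: tpB_segs l (0 :: r) n := by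
  unfold tpB_segs
  simp only [List.map_cons, List.zip_cons_cons, List.drop_one, List.tail_cons,
    List.cons_append, List.map_cons]
  congr 1
  simpa [tpB_segs] using segs_shift a l (0 :: r) n

theorem segsB (m : Nat) : ∀ (cs : List Char) (os : List Int), cs.length = os.length → cs.length ≤ m →
    tpB_segs cs (tpB_bounds cs) cs.length = (splitT (cs.zip os)).map (List.map Prod.fst) ∧
    tpB_segs os (tpB_bounds cs) cs.length = (splitT (cs.zip os)).map (List.map Prod.snd) := by
  induction m with
  | zero =>
    intro cs os _ hm
    have : cs = [] := List.eq_nil_of_length_eq_zero (Nat.le_zero.mp hm)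
    subst this
    simp [tpB_segs, tpB_bounds, splitT]
  | succ m ih =>
    intro cs os hlen hm
    match cs, os with
    | [], [] => simp [tpB_segs, tpB_bounds, splitT]
    | [a], [o] =>
      constructor <;> simp [tpB_segs, tpB_bounds, splitT, List.range_succ]
    | a :: b :: t, o :: o2 :: t2 =>
      have hlen' : (b :: t).length = (o2 :: t2).length := by simpa using hlen
      have hm' : (b :: t).length ≤ m := by simpa using hm
      have IH := ih (b :: t) (o2 :: t2) hlen' hm'
      obtain ⟨r, hr⟩ := bounds_head b t
      rw [hr] at IH
      have hlt : t.length = t2.length := by simpa using hlen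
      have hz : (a :: b :: t).zip (o :: o2 :: t2) = (a, o) :: (b :: t).zip (o2 :: t2) := rfl
      have hz' : (b :: t).zip (o2 :: t2) = (b, o2) :: t.zip t2 := rfl
      have hlen2 : (o2 :: t2).length = (b :: t).length := by simpa using hlen'.symm
      by_cases hc : (isPunct a || isPunct b) = true
      · -- cut before b: [a] alone, then the segments of the tail
        have hb : tpB_bounds (a :: b :: t) = 0 :: ((0 :: r).map Nat.succ) := by
          rw [bounds_cons, if_pos hc, hr]
        have hsp : splitT ((a, o) :: (b :: t).zip (o2 :: t2)) =
            [(a, o)] :: splitT ((b :: t).zip (o2 :: t2)) := by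
          rw [hz', splitT]
          simp only [hc, ite_true]
        constructor
        · rw [hb, hz, hsp, show (a :: b :: t).length = (b :: t).length + 1 from rfl,
            segs_cut, IH.1]
          simp
        · rw [hb, hz, hsp, show (a :: b :: t).length = (o2 :: t2).length + 1 from by
            simp [hlt], segs_cut, show (o2 :: t2).length = (b :: t).length from hlen2, IH.2]
          simp
      · -- no cut: a joins the first segment of the tail
        have hb : tpB_bounds (a :: b :: t) = 0 :: (r.map Nat.succ) := by
          rw [bounds_cons, if_neg hc, hr]
          simp
        obtain ⟨g, gs, hsp0⟩ : ∃ g gs, splitT ((b :: t).zip (o2 :: t2)) = g :: gs := by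
          rw [hz']
          match h : splitT ((b, o2) :: t.zip t2) with
          | [] => exact absurd h (splitT_ne_nil _ _)
          | g :: gs => exact ⟨g, gs, rfl⟩
        have hsp : splitT ((a, o) :: (b :: t).zip (o2 :: t2)) = ((a, o) :: g) :: gs := by
          rw [hz', splitT]
          simp only [hc, Bool.false_eq_true, ite_false]
          rw [← hz', hsp0]
        rw [hz'] at hsp0
        rw [← hz'] at hsp0
        have h1 : tpB_segs (b :: t) (0 :: r) (b :: t).length = (g.map Prod.fst) :: gs.map (List.map Prod.fst) := by
          rw [IH.1, hsp0, List.map_cons]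
        have h2 : tpB_segs (o2 :: t2) (0 :: r) (b :: t).length = (g.map Prod.snd) :: gs.map (List.map Prod.snd) := by
          rw [IH.2, hsp0, List.map_cons]
        constructor
        · rw [hb, hz, hsp, show (a :: b :: t).length = (b :: t).length + 1 from rfl,
            segs_join, h1]
          simp
        · rw [hb, hz, hsp, show (a :: b :: t).length = (o2 :: t2).length + 1 from by
            simp [hlt], segs_join,
            show (o2 :: t2).length = (b :: t).length from hlen2, h2]
          simp

theorem zip_take_self (cs : List Char) : ∀ (offset : List Int), cs.zip offset = cs.zip (offset.take cs.length) := by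
  induction cs with
  | nil => intro o; simp
  | cons a t ih =>
    intro o
    match o with
    | [] => simp
    | x :: o' => simp [List.zip_cons_cons, ih o']
theorem offs_take (offset : List Int) : ∀ (n : Nat), n ≤ offset.length →
    (List.range n).map (fun j : Nat => (PySem.List.pyGet? offset (j : Int)).getD 0) = offset.take n := by
  intro n
  induction n with
  | zero => intro _; simp
  | succ n ih =>
    intro h
    rw [List.range_succ, List.map_append, ih (by omega), List.take_add_one]
    simp [PySem.List.pyGet?_natCast, List.getElem?_eq_getElem (by omega : n < offset.length)]

-- ===== VERDICT (by name: the statement is the Claim_ definition above) =====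
theorem tokenize_punctuation_spec : Claim_equal_tokenize_punctuation := by
  intro word offset _ hpre
  unfold Spec_tokenize_punctuation tokenize_punctuation tokenize_punctuation_alt
  have hA := (loopA word.toList.length word.toList offset hpre le_rfl).1 [] []
  have hz := zip_take_self word.toList offset
  have hpre' : word.length ≤ offset.length := by simpa using hpre
  have hlen : word.toList.length = (offset.take word.toList.length).length := by
    simp [Nat.min_eq_left hpre']
  have hsB := segsB word.toList.length word.toList (offset.take word.toList.length) hlen le_rfl
  have hout := out_eq_splitT (word.toList.zip (offset.take word.toList.length)).length
    (word.toList.zip (offset.take word.toList.length)) le_rfl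
  simp only [hA, List.append_nil, List.reverse_reverse]
  rw [offs_take offset word.toList.length (by simpa using hpre), hz, hout.1, hout.2, hsB.1, hsB.2]
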